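-- pv_equiv track=rewrite | github.com/vita-epfl/civil127-2025 | solutions/exercise_5_1/search.py | alternating
-- ===== SOURCE A (Python) =====
-- from enum import Enum
--
-- class NextState(Enum):
--     LT = "<"
--     GT = ">"
--
-- def alternating(s):
--     if len(s) < 2:
--         # Arbitrary choice to consider 1-digit numbers to not be alternating
--         return False
--
--     next_state = None
--     if s[0] < s[1]:
--         next_state = NextState.GT
--     elif s[0] > s[1]:
--         next_state = NextState.LT
--     else:
--         return False
--
--     for i in range(1, len(s)-1):
--         match next_state:
--             case NextState.GT:
--                 if s[i] <= s[i+1]: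
--                     return False
--                 next_state = NextState.LT
--             case NextState.LT:
--                 if s[i] >= s[i+1]:
--                     return False
--                 next_state = NextState.GT
--     return True
-- ===== SOURCE B (Python) =====
-- def alternating(s):
--     if len(s) < 2:
--         return False
--     signs = [(a > b) - (a < b) for a, b in zip(s, s[1:])]
--     if any(q == 0 for q in signs):
--         return False
--     return all(p * q == -1 for p, q in zip(signs, signs[1:]))
-- ===== Notes on version B (the rewrite author's own statement) =====
-- stated objective: simpler
-- what changed: Replaces the explicit LT/GT state machine with a derived list of comparison signs, rejecting any zero sign and requiring adjacent signs to multiply to -1.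
import Mathlib
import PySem

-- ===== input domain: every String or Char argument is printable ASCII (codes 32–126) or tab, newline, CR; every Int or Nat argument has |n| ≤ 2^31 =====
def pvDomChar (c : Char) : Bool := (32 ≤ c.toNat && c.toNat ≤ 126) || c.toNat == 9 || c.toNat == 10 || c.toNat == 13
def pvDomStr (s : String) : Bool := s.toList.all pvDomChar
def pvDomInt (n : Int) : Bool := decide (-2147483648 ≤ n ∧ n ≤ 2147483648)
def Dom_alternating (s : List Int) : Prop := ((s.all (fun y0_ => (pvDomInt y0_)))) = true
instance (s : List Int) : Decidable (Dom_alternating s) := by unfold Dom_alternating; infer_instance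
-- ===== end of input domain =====

-- B replaces A's LT/GT state machine by a derived list of comparison signs,
-- rejecting any zero sign and requiring adjacent signs to multiply to -1 (objective: simpler).

-- ===== PORT A =====
-- class NextState(Enum)
inductive PvNextState | LT | GT
  deriving DecidableEq, Repr

-- the 'for i in range(1, len(s)-1)' loop with its early returns, as recursion on the index list
def pvLoopA (s : List Int) : List Int → PvNextState → Bool
  | [], _ => true
  | i :: rest, st =>
    match st with
    | .GT =>
        if PySem.List.pyGetD s i 0 ≤ PySem.List.pyGetD s (i + 1) 0 then false
        else pvLoopA s rest .LT
    | .LT =>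
        if PySem.List.pyGetD s i 0 ≥ PySem.List.pyGetD s (i + 1) 0 then false
        else pvLoopA s rest .GT

def alternating (s : List Int) : Bool :=
  if s.length < 2 then false
  else
    -- indices 0, 1, i, i+1 are all in range here (length ≥ 2, 1 ≤ i ≤ length-2), so the total pyGetD is exact
    if PySem.List.pyGetD s 0 0 < PySem.List.pyGetD s 1 0 then
      pvLoopA s (PySem.List.pyRange 1 ((s.length : Int) - 1) 1) .GT
    else if PySem.List.pyGetD s 0 0 > PySem.List.pyGetD s 1 0 then
      pvLoopA s (PySem.List.pyRange 1 ((s.length : Int) - 1) 1) .LT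
    else false

-- ===== PORT B =====
-- (a > b) - (a < b)
def pvSgn (a b : Int) : Int := (if a > b then 1 else 0) - (if a < b then 1 else 0)

def alternating_alt (s : List Int) : Bool :=
  if s.length < 2 then false
  else
    let signs := (s.zip s.tail).map (fun p => pvSgn p.1 p.2)
    if signs.any (fun q => q == 0) then false
    else (signs.zip signs.tail).all (fun p => p.1 * p.2 == -1)

-- ===== PRECONDITION & SPEC =====
def Spec_alternating (s : List Int) (out : Bool) : Prop := out = alternating_alt s
instance (s : List Int) (out : Bool) : Decidable (Spec_alternating s out) := by unfold Spec_alternating; infer_instance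

-- ===== CLAIM (what is proved, stated in full; the proofs are below) =====
def Claim_equal_alternating : Prop := ∀ (s : List Int), Dom_alternating s → Spec_alternating s (alternating s)

-- ===== LEMMAS AND PROOFS =====

-- structural version of A's loop: walk the remaining values directly
def pvChain : List Int → PvNextState → Bool
  | a :: b :: rest, .GT => if a ≤ b then false else pvChain (b :: rest) .LT
  | a :: b :: rest, .LT => if a ≥ b then false else pvChain (b :: rest) .GT
  | _, _ => true

-- structural version of B's two checks after the first sign (p = previous sign)
def pvChk (p : Int) (prev : Int) : List Int → Bool
  | [] => true
  | y :: ys => (pvSgn prev y != 0) && (p * pvSgn prev y == -1) && pvChk (pvSgn prev y) y ys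

-- the sign list B derives from a value list
def pvSgl (l : List Int) : List Int := (l.zip l.tail).map (fun p => pvSgn p.1 p.2)

theorem pvChain_short (l : List Int) (st : PvNextState) (h : l.length ≤ 1) : pvChain l st = true := by
  match l, st with
  | [], .LT | [], .GT | [a], .LT | [a], .GT => rfl
  | a :: b :: r, _ => simp at h

theorem pvLoopA_eq_chain (s : List Int) : ∀ (n k : Nat) (st : PvNextState), s.length - k = n → 0 < k →
    pvLoopA s (PySem.List.pyRange (k : Int) ((s.length : Int) - 1) 1) st = pvChain (s.drop k) st := by
  intro n
  induction n with
  | zero =>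
    intro k st hn _
    rw [PySem.List.pyRange_one_eq_nil (by omega), pvChain_short _ _ (by simp; omega)]
    rfl
  | succ m ih =>
    intro k st hn hk
    by_cases hlt : (k : Int) < (s.length : Int) - 1
    · have hkl : k < s.length := by omega
      have hk1 : k + 1 < s.length := by omega
      have e1 : PySem.List.pyGetD s (k : Int) 0 = s[k] := by
        simp [PySem.List.pyGetD_natCast, List.getD_eq_getElem?_getD, hkl]
      have e2 : PySem.List.pyGetD s ((k : Int) + 1) 0 = s[k + 1] := by
        have h' : ((k : Int) + 1) = ((k + 1 : Nat) : Int) := by push_cast; ring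
        rw [h', PySem.List.pyGetD_natCast]
        simp [List.getD_eq_getElem?_getD, hk1]
      have ihGT := ih (k + 1) PvNextState.GT (by omega) (by omega)
      have ihLT := ih (k + 1) PvNextState.LT (by omega) (by omega)
      rw [List.drop_eq_getElem_cons hk1] at ihGT ihLT
      rw [PySem.List.pyRange_one_cons hlt, List.drop_eq_getElem_cons hkl,
          List.drop_eq_getElem_cons hk1]
      have hcast : ((k : Int) + 1) = ((k + 1 : Nat) : Int) := by push_cast; ring
      cases st <;>
        simp only [pvLoopA, pvChain, e1, e2, ge_iff_le] <;>
        split_ifs <;>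
        first
          | rfl
          | (rw [hcast]; exact ihGT)
          | (rw [hcast]; exact ihLT)
    · rw [PySem.List.pyRange_one_eq_nil (by omega), pvChain_short _ _ (by simp; omega)]
      rfl

theorem pvChain_eq_chk (l : List Int) : ∀ (st : PvNextState) (prev : Int),
    pvChain (prev :: l) st = pvChk (match st with | .GT => -1 | .LT => 1) prev l := by
  induction l with
  | nil => intro st prev; cases st <;> rfl
  | cons y ys ih =>
    intro st prev
    rcases lt_trichotomy prev y with h | h | h
    · have hs : pvSgn prev y = -1 := by simp only [pvSgn]; split_ifs <;> omega
      cases st <;> simp [pvChain, pvChk, hs, h, h.le, ih PvNextState.GT y]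
    · have hs : pvSgn prev y = 0 := by simp only [pvSgn]; split_ifs <;> omega
      subst h
      cases st <;> simp [pvChain, pvChk, hs]
    · have hs : pvSgn prev y = 1 := by simp only [pvSgn]; split_ifs <;> omega
      cases st <;> simp [pvChain, pvChk, hs, h.le, not_le.mpr h, ih PvNextState.LT y]

-- B's two scans over the sign list, with the first sign q split off, equal pvChk
theorem pvB_rec (rest : List Int) : ∀ (y q : Int),
    (!(pvSgl (y :: rest)).any (fun r => r == 0) &&
      ((q :: pvSgl (y :: rest)).zip (pvSgl (y :: rest))).all (fun p => p.1 * p.2 == -1))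
    = pvChk q y rest := by
  induction rest with
  | nil => intro y q; rfl
  | cons z zs ih =>
    intro y q
    have ih' := ih z (pvSgn y z)
    simp only [pvSgl, List.tail_cons, List.zip_cons_cons, List.map_cons, List.any_cons,
      List.all_cons, Bool.not_or] at ih' ⊢
    simp only [pvChk]
    rw [← ih']
    simp [bne, Bool.and_assoc, Bool.and_left_comm]

-- ===== VERDICT (by name: the statement is the Claim_ definition above) =====
theorem alternating_spec : Claim_equal_alternating := by
  intro s _
  unfold Spec_alternating
  match s with
  | [] => rfl
  | [x] => rfl
  | x :: y :: rest =>
    have hlen : ¬ ((x :: y :: rest).length < 2) := by simp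
    have e0 : PySem.List.pyGetD (x :: y :: rest) 0 0 = x := by simp [pysem]
    have e1 : PySem.List.pyGetD (x :: y :: rest) 1 0 = y := by simp [pysem]
    have hloop : ∀ st, pvLoopA (x :: y :: rest) (PySem.List.pyRange 1 (((x :: y :: rest).length : Int) - 1) 1) st
        = pvChain (y :: rest) st := by
      intro st
      have := pvLoopA_eq_chain (x :: y :: rest) ((x :: y :: rest).length - 1) 1 st rfl one_pos
      simpa using this
    have hB : alternating_alt (x :: y :: rest)
        = (!(pvSgn x y == 0) && (!(pvSgl (y :: rest)).any (fun r => r == 0) &&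
            ((pvSgn x y :: pvSgl (y :: rest)).zip (pvSgl (y :: rest))).all (fun p => p.1 * p.2 == -1))) := by
      simp only [alternating_alt, hlen, if_false, pvSgl, List.tail_cons, List.zip_cons_cons,
        List.map_cons, List.any_cons]
      cases hA : (pvSgn x y == 0) <;>
        cases hR : ((List.zip (y :: rest) rest).map (fun p => pvSgn p.1 p.2)).any (fun r => r == 0) <;>
        simp_all
    rw [hB, pvB_rec rest y (pvSgn x y)]
    rcases lt_trichotomy x y with h | h | h
    · have hs : pvSgn x y = -1 := by simp only [pvSgn]; split_ifs <;> omega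
      simp only [alternating, hlen, if_false, e0, e1, if_pos h, hloop,
        pvChain_eq_chk rest PvNextState.GT y, hs]
      simp
    · have hs : pvSgn x y = 0 := by simp only [pvSgn]; split_ifs <;> omega
      subst h
      simp [alternating, e0, e1, hs]
    · have hs : pvSgn x y = 1 := by simp only [pvSgn]; split_ifs <;> omega
      simp only [alternating, hlen, if_false, e0, e1, if_neg (not_lt.mpr h.le), if_pos h, hloop,
        pvChain_eq_chk rest PvNextState.LT y, hs]
      simp
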